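-- pv_equiv track=rewrite | github.com/fly-ghost/Q-distillation | rein.py | truncate_function
-- ===== SOURCE A (Python) =====
-- def truncate_function(completion):
--     # 只保留def以后的部分，不包括def这一行
--     lines = completion.split("\n")
--     i = 0
--     while i < len(lines):
--         single = lines[i]
--         if single.startswith("def"):
--             break
--         i = i + 1
--     return "\n".join(lines[i+1:])
-- ===== SOURCE B (Python) =====
-- def truncate_function(completion):
--     # Scan the raw string for a line start "def" instead of splitting into lines.
--     if completion.startswith("def"):
--         rest = completion
--     else:
--         pos = completion.find("\ndef")
--         if pos == -1:
--             return ""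
--         rest = completion[pos + 1:]
--     nl = rest.find("\n")
--     return "" if nl == -1 else rest[nl + 1:]
-- ===== Notes on version B (the rewrite author's own statement) =====
-- stated objective: idiomatic
-- what changed: B drops the split-into-lines list and the index loop: it scans the raw string once with startswith/find for a line start 'def', then slices the text after that line's newline.
import Mathlib
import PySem

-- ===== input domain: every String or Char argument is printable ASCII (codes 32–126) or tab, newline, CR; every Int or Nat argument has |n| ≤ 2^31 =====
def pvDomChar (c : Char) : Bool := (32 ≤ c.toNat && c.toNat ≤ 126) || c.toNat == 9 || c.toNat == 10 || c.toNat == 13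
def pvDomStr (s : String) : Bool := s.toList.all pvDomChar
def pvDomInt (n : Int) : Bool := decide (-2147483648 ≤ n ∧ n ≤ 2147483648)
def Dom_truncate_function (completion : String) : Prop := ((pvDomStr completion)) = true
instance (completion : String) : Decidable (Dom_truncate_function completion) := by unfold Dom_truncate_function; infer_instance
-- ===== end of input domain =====

-- B replaces A's split-into-lines list and index loop by a single raw-string scan
-- (startswith/find for a line start 'def', then a slice past that line's newline); same cost, plainer.

-- ===== PORT A =====
-- the 'while i < len(lines): … i = i + 1' loop; returns the final i
def pvWhileA (lines : List (List Char)) (i : Nat) : Nat :=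
  if h : i < lines.length then
    if PySem.Chars.startswith lines[i] ['d', 'e', 'f'] then i
    else pvWhileA lines (i + 1)
  else i
termination_by lines.length - i

def truncate_function (completion : String) : String :=
  let lines := PySem.Chars.splitOn completion.toList ['\n']
  let i := pvWhileA lines 0
  String.ofList (PySem.Chars.join ['\n'] (PySem.List.slice lines (some ((i : Int) + 1)) none))

-- ===== PORT B =====
-- Source B's shared tail: nl = rest.find("\n"); return "" if nl == -1 else rest[nl+1:]
def pvAfterNl (rest : List Char) : List Char :=
  let nl := PySem.Chars.find rest ['\n']
  if nl = -1 then [] else PySem.Chars.slice rest (some (nl + 1)) none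

-- the branch of Source B choosing 'rest' (none = the early 'return ""')
def pvRestB (cs : List Char) : Option (List Char) :=
  if PySem.Chars.startswith cs ['d', 'e', 'f'] then some cs
  else
    let pos := PySem.Chars.find cs ['\n', 'd', 'e', 'f']
    if pos = -1 then none
    else some (PySem.Chars.slice cs (some (pos + 1)) none)

def truncate_function_alt (completion : String) : String :=
  match pvRestB completion.toList with
  | none => ""
  | some rest => String.ofList (pvAfterNl rest)

-- ===== PRECONDITION & SPEC =====
def Spec_truncate_function (completion : String) (out : String) : Prop := out = truncate_function_alt completion
instance (completion : String) (out : String) : Decidable (Spec_truncate_function completion out) := by unfold Spec_truncate_function; infer_instance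

-- ===== CLAIM (what is proved, stated in full; the proofs are below) =====
def Claim_equal_truncate_function : Prop := ∀ (completion : String), Dom_truncate_function completion → Spec_truncate_function completion (truncate_function completion)

-- ===== LEMMAS AND PROOFS =====

-- simple recursive splitter on '\n' (proof-side model of split("\n"))
def pvSplitNl : List Char → List (List Char)
  | [] => [[]]
  | c :: rest =>
    if c = '\n' then [] :: pvSplitNl rest
    else
      match pvSplitNl rest with
      | [] => [[c]]
      | p :: ps => (c :: p) :: ps

theorem pvSplitNl_ne_nil (cs : List Char) : pvSplitNl cs ≠ [] := by
  induction cs with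
  | nil => simp [pvSplitNl]
  | cons c rest ih =>
    simp only [pvSplitNl]
    split
    · simp
    · cases h : pvSplitNl rest <;> simp

theorem pvGo : ∀ (fuel : Nat) (l cur : List Char) (acc : List (List Char)),
    l.length < fuel →
    PySem.Chars.splitOn.go ['\n'] fuel l cur acc =
      acc.reverse ++
        (match pvSplitNl l with
         | [] => [cur.reverse]
         | p :: ps => (cur.reverse ++ p) :: ps) := by
  intro fuel
  induction fuel with
  | zero => intro l cur acc h; omega
  | succ f ih =>
    intro l cur acc h
    cases l with
    | nil => simp [PySem.Chars.splitOn.go, pvSplitNl]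
    | cons c rest =>
      rw [PySem.Chars.splitOn.go]
      by_cases hc : c = '\n'
      · subst hc
        have hpre : List.isPrefixOf ['\n'] ('\n' :: rest) = true := by
          simp [List.isPrefixOf]
        rw [if_pos hpre]
        rw [show List.drop (['\n'] : List Char).length ('\n' :: rest) = rest from rfl]
        rw [ih rest [] (cur.reverse :: acc) (by simpa using Nat.lt_of_succ_lt_succ h)]
        have hred : pvSplitNl ('\n' :: rest) = [] :: pvSplitNl rest := by
          simp [pvSplitNl]
        rw [hred]
        cases hs : pvSplitNl rest with
        | nil => exact absurd hs (pvSplitNl_ne_nil rest)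
        | cons p ps => simp
      · have hpre : List.isPrefixOf ['\n'] (c :: rest) = false := by
          simp [List.isPrefixOf]
          intro hcc
          exact absurd hcc.symm hc
        rw [if_neg (by simp [hpre])]
        rw [ih rest (c :: cur) acc (by simpa using Nat.lt_of_succ_lt_succ h)]
        simp only [pvSplitNl, if_neg hc]
        cases hs : pvSplitNl rest <;> simp

theorem pvSplitOn_eq (cs : List Char) : PySem.Chars.splitOn cs ['\n'] = pvSplitNl cs := by
  unfold PySem.Chars.splitOn
  rw [pvGo (cs.length + 1) cs [] [] (by omega)]
  cases hs : pvSplitNl cs with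
  | nil => exact absurd hs (pvSplitNl_ne_nil cs)
  | cons p ps => simp

theorem pvSplitNl_no_nl : ∀ {cs : List Char}, '\n' ∉ cs → pvSplitNl cs = [cs] := by
  intro cs
  induction cs with
  | nil => intro _; rfl
  | cons c rest ih =>
    intro h
    have hc : ¬ c = '\n' := fun hh => h (by simp [hh])
    have hr : '\n' ∉ rest := fun hh => h (by simp [hh])
    simp only [pvSplitNl, if_neg hc, ih hr]

theorem pvSplitNl_append {a : List Char} (b : List Char) (h : '\n' ∉ a) :
    pvSplitNl (a ++ '\n' :: b) = a :: pvSplitNl b := by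
  induction a with
  | nil => simp [pvSplitNl]
  | cons c a' ih =>
    have hc : ¬ c = '\n' := fun hh => h (by simp [hh])
    have ha' : '\n' ∉ a' := fun hh => h (by simp [hh])
    simp only [List.cons_append, pvSplitNl, if_neg hc, ih ha']

theorem pvJoinConsCons (x y : List Char) (l : List (List Char)) :
    PySem.Chars.join ['\n'] (x :: y :: l) = x ++ '\n' :: PySem.Chars.join ['\n'] (y :: l) := by
  rw [PySem.Chars.join_cons_cons]
  simp

theorem pvJoin_pvSplitNl (b : List Char) : PySem.Chars.join ['\n'] (pvSplitNl b) = b := by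
  induction b with
  | nil => simp [pvSplitNl, PySem.Chars.join_singleton]
  | cons c rest ih =>
    cases hs : pvSplitNl rest with
    | nil => exact absurd hs (pvSplitNl_ne_nil rest)
    | cons p ps =>
      rw [hs] at ih
      by_cases hc : c = '\n'
      · subst hc
        have hred : pvSplitNl ('\n' :: rest) = [] :: pvSplitNl rest := by
          simp [pvSplitNl]
        rw [hred, hs, pvJoinConsCons, ih]
        simp
      · simp only [pvSplitNl, if_neg hc, hs]
        cases ps with
        | nil =>
          rw [PySem.Chars.join_singleton] at ih ⊢
          rw [ih]
        | cons q qs =>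
          rw [pvJoinConsCons] at ih ⊢
          rw [← ih]
          simp

theorem pvWhileA_stop {lines : List (List Char)} {i : Nat} (h : ¬ i < lines.length) :
    pvWhileA lines i = i := by
  conv_lhs => rw [pvWhileA]
  rw [dif_neg h]

theorem pvWhileA_step {lines : List (List Char)} {i : Nat} (h : i < lines.length) :
    pvWhileA lines i =
      if PySem.Chars.startswith lines[i] ['d', 'e', 'f'] then i else pvWhileA lines (i + 1) := by
  conv_lhs => rw [pvWhileA]
  rw [dif_pos h]

theorem pvWhileA_shift (ls : List (List Char)) (l : List Char) (i : Nat) :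
    pvWhileA (l :: ls) (i + 1) = pvWhileA ls i + 1 := by
  have H : ∀ n i, ls.length - i ≤ n → pvWhileA (l :: ls) (i + 1) = pvWhileA ls i + 1 := by
    intro n
    induction n with
    | zero =>
      intro i h
      rw [pvWhileA_stop (by simp; omega), pvWhileA_stop (by omega)]
    | succ n ihn =>
      intro i h
      by_cases hi : i < ls.length
      · rw [pvWhileA_step (by simp; omega : i + 1 < (l :: ls).length), pvWhileA_step hi]
        simp only [List.getElem_cons_succ]
        split
        · rfl
        · exact ihn (i + 1) (by omega)
      · rw [pvWhileA_stop (by simp; omega), pvWhileA_stop hi]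
  exact H (ls.length - i) i le_rfl

-- A's result as a function of the line list
def pvResA (lines : List (List Char)) : List Char :=
  PySem.Chars.join ['\n'] (lines.drop (pvWhileA lines 0 + 1))

theorem pvA_eq_resA (cs : List Char) :
    PySem.Chars.join ['\n']
      (PySem.List.slice (PySem.Chars.splitOn cs ['\n'])
        (some ((pvWhileA (PySem.Chars.splitOn cs ['\n']) 0 : Int) + 1)) none) =
      pvResA (pvSplitNl cs) := by
  rw [pvSplitOn_eq]
  have hcast : ((pvWhileA (pvSplitNl cs) 0 : Int) + 1) = ((pvWhileA (pvSplitNl cs) 0 + 1 : Nat) : Int) := by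
    push_cast; ring
  rw [hcast, PySem.List.slice_from_natCast]
  rfl

theorem pvResA_nil : pvResA [] = [] := by
  simp [pvResA, pvWhileA_stop, PySem.Chars.join_nil]

theorem pvResA_cons (l : List Char) (ls : List (List Char)) :
    pvResA (l :: ls) =
      if PySem.Chars.startswith l ['d', 'e', 'f'] then PySem.Chars.join ['\n'] ls
      else pvResA ls := by
  unfold pvResA
  rw [pvWhileA_step (by simp : 0 < (l :: ls).length)]
  simp only [List.getElem_cons_zero]
  split
  · simp
  · rw [show (0 : Nat) + 1 = 0 + 1 from rfl, pvWhileA_shift]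
    simp

-- B's list-level result
def pvB (cs : List Char) : List Char :=
  match pvRestB cs with
  | none => []
  | some rest => pvAfterNl rest

theorem pvAlt_eq_pvB (completion : String) :
    truncate_function_alt completion = String.ofList (pvB completion.toList) := by
  unfold truncate_function_alt pvB
  cases pvRestB completion.toList <;> rfl

-- a prefix's entries agree with the big list's
theorem pvPrefixGetElem {p l : List Char} (h : p <+: l) (i : Nat) (hi : i < p.length)
    (hi2 : i < l.length) : l[i] = p[i] := by
  obtain ⟨t, rfl⟩ := h
  exact List.getElem_append_left hi

-- find = k when sub is first found at offset k
theorem pvFind_eq {s sub : List Char} {k : Nat} (h1 : sub <+: s.drop k)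
    (h2 : ∀ i, i < k → ¬ sub <+: s.drop i) : PySem.Chars.find s sub = (k : Int) := by
  have hinf : sub <:+: s := h1.isInfix.trans (List.drop_suffix k s).isInfix
  have h0 : 0 ≤ PySem.Chars.find s sub := (PySem.Chars.find_nonneg_iff _ _).mpr hinf
  obtain ⟨hp, hmin⟩ := PySem.Chars.find_spec h0
  have hk : (PySem.Chars.find s sub).toNat = k := by
    by_contra hne
    rcases Nat.lt_or_ge (PySem.Chars.find s sub).toNat k with hlt | hge
    · exact h2 _ hlt hp
    · exact hmin k (by omega) h1
  omega

theorem pvDropSame {a : List Char} (b : List Char) :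
    (a ++ '\n' :: b).drop a.length = '\n' :: b := by
  exact List.drop_left

theorem pvDropDeep {a : List Char} (b : List Char) (m : Nat) :
    (a ++ '\n' :: b).drop (a.length + 1 + m) = b.drop m := by
  rw [show a ++ '\n' :: b = (a ++ ['\n']) ++ b by simp]
  rw [List.drop_append]
  simp

theorem pvNoPrefixLt {a b sub : List Char} (hna : '\n' ∉ a) (i : Nat) (hi : i < a.length) :
    ¬ ('\n' :: sub) <+: (a ++ '\n' :: b).drop i := by
  intro h
  have hlen : i < (a ++ '\n' :: b).length := by simp; omega
  have hh : ((a ++ '\n' :: b).drop i).head? = some '\n' := by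
    obtain ⟨t, ht⟩ := h
    rw [← ht]; rfl
  rw [List.head?_drop] at hh
  have : (a ++ '\n' :: b)[i]? = a[i]? := List.getElem?_append_left hi
  rw [this, List.getElem?_eq_getElem hi] at hh
  have : a[i] = '\n' := by simpa using hh
  exact hna (this ▸ List.getElem_mem hi)

-- a '\n'-free pattern is a prefix of a ++ '\n' :: b iff of a
theorem pvPrefixAppend {p a b : List Char} (hp : '\n' ∉ p) (_ha : '\n' ∉ a) :
    p <+: (a ++ '\n' :: b) ↔ p <+: a := by
  constructor
  · intro h
    rcases Nat.lt_or_ge a.length p.length with hl | hl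
    · exfalso
      have hlen : a.length < (a ++ '\n' :: b).length := by simp
      have := pvPrefixGetElem h a.length hl hlen
      have hv : (a ++ '\n' :: b)[a.length] = '\n' := by
        rw [List.getElem_append_right (le_refl a.length)]
        simp
      rw [hv] at this
      exact hp (this ▸ List.getElem_mem hl)
    · exact List.prefix_of_prefix_length_le h (a.prefix_append ('\n' :: b)) hl
  · intro h
    exact h.trans (a.prefix_append ('\n' :: b))

theorem pvStartswithAppend {p a : List Char} (b : List Char) (hp : '\n' ∉ p) (ha : '\n' ∉ a) :
    PySem.Chars.startswith (a ++ '\n' :: b) p = PySem.Chars.startswith a p := by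
  by_cases h : p <+: a
  · rw [(PySem.Chars.startswith_iff _ _).mpr ((pvPrefixAppend hp ha).mpr h),
      (PySem.Chars.startswith_iff _ _).mpr h]
  · have h1 : PySem.Chars.startswith (a ++ '\n' :: b) p = false := by
      cases hx : PySem.Chars.startswith (a ++ '\n' :: b) p
      · rfl
      · exact absurd ((pvPrefixAppend hp ha).mp ((PySem.Chars.startswith_iff _ _).mp hx)) h
    have h2 : PySem.Chars.startswith a p = false := by
      cases hx : PySem.Chars.startswith a p
      · rfl
      · exact absurd ((PySem.Chars.startswith_iff _ _).mp hx) h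
    rw [h1, h2]

theorem pvFindNl {a : List Char} (b : List Char) (ha : '\n' ∉ a) :
    PySem.Chars.find (a ++ '\n' :: b) ['\n'] = (a.length : Int) := by
  apply pvFind_eq
  · rw [pvDropSame]
    exact ⟨b, rfl⟩
  · intro i hi
    exact pvNoPrefixLt ha i hi

theorem pvFindNlDef {a : List Char} (b : List Char) (ha : '\n' ∉ a) :
    PySem.Chars.find (a ++ '\n' :: b) ['\n', 'd', 'e', 'f'] =
      if PySem.Chars.startswith b ['d', 'e', 'f'] then (a.length : Int)
      else if PySem.Chars.find b ['\n', 'd', 'e', 'f'] = -1 then -1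
      else (a.length : Int) + 1 + PySem.Chars.find b ['\n', 'd', 'e', 'f'] := by
  by_cases hsb : PySem.Chars.startswith b ['d', 'e', 'f']
  · rw [if_pos hsb]
    apply pvFind_eq
    · rw [pvDropSame]
      exact List.cons_prefix_cons.mpr ⟨rfl, (PySem.Chars.startswith_iff _ _).mp hsb⟩
    · intro i hi
      exact pvNoPrefixLt ha i hi
  · rw [if_neg hsb]
    have hnb : ¬ (['d', 'e', 'f'] <+: b) := fun hh => hsb ((PySem.Chars.startswith_iff _ _).mpr hh)
    by_cases hf : PySem.Chars.find b ['\n', 'd', 'e', 'f'] = -1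
    · rw [if_pos hf]
      rw [PySem.Chars.find_eq_neg_one_iff] at hf ⊢
      intro hinf
      apply hf
      have hin : PySem.Chars.isIn ['\n', 'd', 'e', 'f'] (a ++ '\n' :: b) = true :=
        (PySem.Chars.isIn_iff_infix _ _).mpr hinf
      obtain ⟨j, hj⟩ := (PySem.Chars.exists_prefix_drop_iff_isIn _ _).mpr hin
      rcases Nat.lt_or_ge j a.length with hlt | hge
      · exact absurd hj (pvNoPrefixLt ha j hlt)
      rcases Nat.eq_or_lt_of_le hge with heq | hgt
      · rw [← heq, pvDropSame] at hj
        exact absurd (List.cons_prefix_cons.mp hj).2 hnb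
      · have hj' : ['\n', 'd', 'e', 'f'] <+: b.drop (j - a.length - 1) := by
          rw [show j = a.length + 1 + (j - a.length - 1) by omega, pvDropDeep] at hj
          exact hj
        exact hj'.isInfix.trans (List.drop_suffix _ b).isInfix
    · rw [if_neg hf]
      have h0 : 0 ≤ PySem.Chars.find b ['\n', 'd', 'e', 'f'] := by
        have := PySem.Chars.neg_one_le_find (s := b) (sub := ['\n', 'd', 'e', 'f'])
        omega
      obtain ⟨hp, hmin⟩ := PySem.Chars.find_spec h0
      set k := (PySem.Chars.find b ['\n', 'd', 'e', 'f']).toNat with hk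
      have : PySem.Chars.find (a ++ '\n' :: b) ['\n', 'd', 'e', 'f'] = ((a.length + 1 + k : Nat) : Int) := by
        apply pvFind_eq
        · rw [pvDropDeep]
          exact hp
        · intro i hi hpre
          rcases Nat.lt_or_ge i a.length with hlt | hge
          · exact pvNoPrefixLt ha i hlt hpre
          rcases Nat.eq_or_lt_of_le hge with heq | hgt
          · rw [← heq, pvDropSame] at hpre
            exact hnb (List.cons_prefix_cons.mp hpre).2
          · have : ['\n', 'd', 'e', 'f'] <+: b.drop (i - a.length - 1) := by
              rw [show i = a.length + 1 + (i - a.length - 1) by omega, pvDropDeep] at hpre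
              exact hpre
            exact hmin (i - a.length - 1) (by omega) this
      rw [this]
      push_cast
      omega

theorem pvDecomp : ∀ {cs : List Char}, '\n' ∈ cs → ∃ a b, cs = a ++ '\n' :: b ∧ '\n' ∉ a := by
  intro cs
  induction cs with
  | nil => intro h; simp at h
  | cons c rest ih =>
    intro h
    by_cases hc : c = '\n'
    · exact ⟨[], rest, by simp [hc], by simp⟩
    · have hr : '\n' ∈ rest := by
        rcases List.mem_cons.mp h with h1 | h1
        · exact absurd h1.symm hc
        · exact h1
      obtain ⟨a, b, hab, hna⟩ := ih hr
      refine ⟨c :: a, b, by simp [hab], ?_⟩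
      intro hm
      rcases List.mem_cons.mp hm with h1 | h1
      · exact hc h1.symm
      · exact hna h1

theorem pvSliceDrop {a : List Char} (b : List Char) (m : Nat) :
    PySem.Chars.slice (a ++ '\n' :: b) (some ((a.length : Int) + 1 + (m : Int))) none = b.drop m := by
  have hcast : ((a.length : Int) + 1 + (m : Int)) = ((a.length + 1 + m : Nat) : Int) := by
    push_cast; ring
  rw [hcast]
  simp only [PySem.Chars.slice_eq_listSlice, PySem.List.slice_from_natCast]
  exact pvDropDeep b m

theorem pvSliceDrop0 {a : List Char} (b : List Char) :
    PySem.Chars.slice (a ++ '\n' :: b) (some ((a.length : Int) + 1)) none = b := by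
  have h := pvSliceDrop (a := a) b 0
  rw [show ((a.length : Int) + 1 + ((0 : Nat) : Int)) = ((a.length : Int) + 1) by push_cast; ring] at h
  simpa using h

theorem pvSliceNat (xs : List Char) (k : Nat) :
    PySem.Chars.slice xs (some ((k : Int) + 1)) none = xs.drop (k + 1) := by
  have hcast : ((k : Int) + 1) = ((k + 1 : Nat) : Int) := by push_cast; ring
  rw [hcast]
  simp only [PySem.Chars.slice_eq_listSlice, PySem.List.slice_from_natCast]

theorem pvMainNoNl {cs : List Char} (hm : '\n' ∉ cs) : pvResA (pvSplitNl cs) = pvB cs := by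
  rw [pvSplitNl_no_nl hm, pvResA_cons]
  have hAside : (if PySem.Chars.startswith cs ['d', 'e', 'f'] then PySem.Chars.join ['\n'] []
      else pvResA []) = [] := by
    split
    · exact PySem.Chars.join_nil _
    · exact pvResA_nil
  rw [hAside]
  have hfnl : PySem.Chars.find cs ['\n'] = -1 := by
    rw [PySem.Chars.find_eq_neg_one_iff]
    intro hinf
    exact hm (List.singleton_sublist.mp hinf.sublist)
  have hfnd : PySem.Chars.find cs ['\n', 'd', 'e', 'f'] = -1 := by
    rw [PySem.Chars.find_eq_neg_one_iff]
    intro hinf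
    exact hm (hinf.sublist.subset (by simp))
  unfold pvB pvRestB
  by_cases hs : PySem.Chars.startswith cs ['d', 'e', 'f']
  · rw [if_pos hs]
    show ([] : List Char) = pvAfterNl cs
    unfold pvAfterNl
    rw [hfnl]
    simp
  · rw [if_neg hs]
    simp [hfnd]

theorem pvAfterNl_of_append {a : List Char} (b : List Char) (ha : '\n' ∉ a) :
    pvAfterNl (a ++ '\n' :: b) = b := by
  unfold pvAfterNl
  rw [pvFindNl b ha]
  rw [if_neg (by omega)]
  exact pvSliceDrop0 b

theorem pvMain : ∀ (n : Nat) (cs : List Char), cs.length ≤ n → pvResA (pvSplitNl cs) = pvB cs := by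
  intro n
  induction n with
  | zero =>
    intro cs hlen
    have : cs = [] := List.eq_nil_of_length_eq_zero (by omega)
    subst this
    exact pvMainNoNl (by simp)
  | succ n ih =>
    intro cs hlen
    by_cases hm : '\n' ∈ cs
    · obtain ⟨a, b, rfl, hna⟩ := pvDecomp hm
      have hblen : b.length ≤ n := by
        simp only [List.length_append, List.length_cons] at hlen
        omega
      rw [pvSplitNl_append b hna, pvResA_cons]
      have hdef : '\n' ∉ (['d', 'e', 'f'] : List Char) := by decide
      by_cases hsa : PySem.Chars.startswith a ['d', 'e', 'f']
      · -- the first line starts with def: both return b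
        rw [if_pos hsa, pvJoin_pvSplitNl]
        unfold pvB pvRestB
        rw [pvStartswithAppend b hdef hna, hsa]
        exact (pvAfterNl_of_append b hna).symm
      · rw [if_neg hsa, ih b hblen]
        unfold pvB pvRestB
        rw [pvStartswithAppend b hdef hna]
        rw [pvFindNlDef b hna]
        by_cases hsb : PySem.Chars.startswith b ['d', 'e', 'f']
        · simp only [if_neg hsa, if_pos hsb]
          rw [if_neg (show ¬ ((a.length : Int) = -1) by omega)]
          rw [pvSliceDrop0 b]
        · simp only [if_neg hsa, if_neg hsb]
          by_cases hfb : PySem.Chars.find b ['\n', 'd', 'e', 'f'] = -1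
          · simp [hfb]
          · simp only [if_neg hfb]
            have h0 : 0 ≤ PySem.Chars.find b ['\n', 'd', 'e', 'f'] := by
              have := PySem.Chars.neg_one_le_find (s := b) (sub := ['\n', 'd', 'e', 'f'])
              omega
            rw [if_neg (show ¬ ((a.length : Int) + 1 + PySem.Chars.find b ['\n', 'd', 'e', 'f'] = -1) by omega)]
            set k := (PySem.Chars.find b ['\n', 'd', 'e', 'f']).toNat with hk
            have hke : PySem.Chars.find b ['\n', 'd', 'e', 'f'] = (k : Int) := by omega
            rw [hke, pvSliceNat b k]
            have hbig : PySem.Chars.slice (a ++ '\n' :: b) (some ((a.length : Int) + 1 + (k : Int) + 1)) none = b.drop (k + 1) := by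
              have := pvSliceDrop (a := a) b (k + 1)
              rw [show ((a.length : Int) + 1 + ((k + 1 : Nat) : Int)) = ((a.length : Int) + 1 + (k : Int) + 1) by push_cast; ring] at this
              exact this
            rw [hbig]
    · exact pvMainNoNl hm

-- ===== VERDICT (by name: the statement is the Claim_ definition above) =====
theorem truncate_function_spec : Claim_equal_truncate_function := by
  intro completion _
  unfold Spec_truncate_function
  rw [pvAlt_eq_pvB]
  unfold truncate_function
  show String.ofList (PySem.Chars.join ['\n']
      (PySem.List.slice (PySem.Chars.splitOn completion.toList ['\n'])
        (some ((pvWhileA (PySem.Chars.splitOn completion.toList ['\n']) 0 : Int) + 1)) none)) = _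
  rw [pvA_eq_resA, pvMain completion.toList.length completion.toList le_rfl]
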